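-- pv_equiv track=rewrite | github.com/idrapeau/level-up-python-3210418 | src/13 Solve a Sudoku/sudoku_idrapeau.py | unique_in_area
-- ===== SOURCE A (Python) =====
-- def unique_in_area(possible_values, index, number):
--   x = index[0]
--   y = index[1]
--   unique_in_row = True
--   unique_in_col = True
--   unique_in_box = True
--
--   for key in possible_values:
--     if key[0] == x and key[1] == y:
--       continue
--     if key[0] == x and number in possible_values[key]:
--       unique_in_row = False
--     if key[1] == y and number in possible_values[key]:
--       unique_in_col = False
--     if key[0]//3 == x//3 and key[1]//3 == y//3 and number in possible_values[key]:
--       unique_in_box = False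
--
--   return unique_in_row or unique_in_col or unique_in_box
-- ===== SOURCE B (Python) =====
-- def unique_in_area(possible_values, index, number):
--     # Histogram phase: count, per row / column / box, how many cells could hold `number`.
--     rows, cols, boxes = {}, {}, {}
--     for key, values in possible_values.items():
--         if number in values:
--             rows[key[0]] = rows.get(key[0], 0) + 1
--             cols[key[1]] = cols.get(key[1], 0) + 1
--             box = (key[0] // 3, key[1] // 3)
--             boxes[box] = boxes.get(box, 0) + 1
--     # Query phase: the cell itself contributes self_hit to each of its three groups,
--     # so a group is conflict-free exactly when its count equals that contribution.
--     self_hit = 1 if number in possible_values.get(index, []) else 0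
--     x, y = index
--     return (rows.get(x, 0) == self_hit
--             or cols.get(y, 0) == self_hit
--             or boxes.get((x // 3, y // 3), 0) == self_hit)
-- ===== Notes on version B (the rewrite author's own statement) =====
-- stated objective: alternative
-- what changed: A scans every cell threading three boolean flags tested against the query cell; B instead aggregates the board once into per-row, per-column and per-box histograms (dicts counting cells that could hold the number) and then answers each uniqueness question by comparing the group's count with the query cell's own contribution. Pre_ excludes association lists with duplicate keys, which do not represent any Python dict (the dict collapses them), so the list-level ports cannot be faithful there.
import Mathlib
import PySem

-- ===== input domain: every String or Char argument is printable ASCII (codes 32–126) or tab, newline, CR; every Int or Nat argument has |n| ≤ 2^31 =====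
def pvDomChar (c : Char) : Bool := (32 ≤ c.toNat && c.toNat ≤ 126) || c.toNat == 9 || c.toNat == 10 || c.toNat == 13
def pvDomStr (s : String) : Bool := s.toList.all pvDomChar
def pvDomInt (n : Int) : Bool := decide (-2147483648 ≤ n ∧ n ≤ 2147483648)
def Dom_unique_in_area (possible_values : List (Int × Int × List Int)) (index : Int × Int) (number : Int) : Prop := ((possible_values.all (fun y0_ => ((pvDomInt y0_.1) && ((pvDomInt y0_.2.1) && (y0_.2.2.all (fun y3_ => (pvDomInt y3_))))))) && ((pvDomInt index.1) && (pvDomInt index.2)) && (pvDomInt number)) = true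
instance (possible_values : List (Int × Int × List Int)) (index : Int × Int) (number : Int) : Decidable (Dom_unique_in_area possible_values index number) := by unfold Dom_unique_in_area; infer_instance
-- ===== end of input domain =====

-- B replaces A's single flag-threading pass by per-row/column/box histograms of cells that
-- could hold the number, queried by comparing each count with the cell's own contribution;
-- objective: alternative. Equal return values on dicts (duplicate-free key lists).


-- ===== PORT A =====
-- `possible_values[key]`: first-match lookup in the association list (exact for a dict, whose keys are distinct)
def pvLookup (d : List (Int × Int × List Int)) (k : Int × Int) : List Int :=
  match d with
  | [] => []
  | e :: rest => if e.1 == k.1 && e.2.1 == k.2 then e.2.2 else pvLookup rest k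

def unique_in_area (possible_values : List (Int × Int × List Int)) (index : Int × Int) (number : Int) : Bool :=
  let x := index.1
  let y := index.2
  let st := possible_values.foldl
    (fun (st : Bool × Bool × Bool) key =>
      if key.1 == x && key.2.1 == y then st
      else
        let r := if key.1 == x && (pvLookup possible_values (key.1, key.2.1)).contains number then false else st.1
        let c := if key.2.1 == y && (pvLookup possible_values (key.1, key.2.1)).contains number then false else st.2.1
        let b := if PySem.Int.floordiv key.1 3 == PySem.Int.floordiv x 3 &&
                    PySem.Int.floordiv key.2.1 3 == PySem.Int.floordiv y 3 &&
                    (pvLookup possible_values (key.1, key.2.1)).contains number then false else st.2.2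
        (r, c, b))
    (true, true, true)
  st.1 || st.2.1 || st.2.2

-- ===== PORT B =====
def unique_in_area_alt (possible_values : List (Int × Int × List Int)) (index : Int × Int) (number : Int) : Bool :=
  -- Histogram phase: per-row / per-column / per-box counts of cells that could hold `number`.
  let st := possible_values.foldl
    (fun (acc : PySem.Dict Int Int × PySem.Dict Int Int × PySem.Dict (Int × Int) Int) e =>
      if e.2.2.contains number then
        (acc.1.insert e.1 (acc.1.getD e.1 0 + 1),
         acc.2.1.insert e.2.1 (acc.2.1.getD e.2.1 0 + 1),
         acc.2.2.insert (PySem.Int.floordiv e.1 3, PySem.Int.floordiv e.2.1 3)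
           (acc.2.2.getD (PySem.Int.floordiv e.1 3, PySem.Int.floordiv e.2.1 3) 0 + 1))
      else acc)
    (PySem.Dict.empty, PySem.Dict.empty, PySem.Dict.empty)
  -- Query phase: a group is conflict-free iff its count equals the cell's own contribution.
  let self_vals := ((possible_values.find? (fun e => e.1 == index.1 && e.2.1 == index.2)).map (fun e => e.2.2)).getD []
  let self_hit : Int := if self_vals.contains number then 1 else 0
  let x := index.1
  let y := index.2
  (st.1.getD x 0 == self_hit) ||
  (st.2.1.getD y 0 == self_hit) ||
  (st.2.2.getD (PySem.Int.floordiv x 3, PySem.Int.floordiv y 3) 0 == self_hit)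

-- ===== PRECONDITION & SPEC =====
-- Pre_ excludes association lists with duplicate keys: those represent no Python dict
-- (dict construction collapses them), so the corner is an artefact of the encoding.
def Pre_unique_in_area (possible_values : List (Int × Int × List Int)) (index : Int × Int) (number : Int) : Prop :=
  (possible_values.map (fun e => (e.1, e.2.1))).Nodup
instance (possible_values : List (Int × Int × List Int)) (index : Int × Int) (number : Int) : Decidable (Pre_unique_in_area possible_values index number) := by unfold Pre_unique_in_area; infer_instance

def pvWitness_unique_in_area : (List (Int × Int × List Int)) × (Int × Int) × Int :=
  ([(0, 0, [1, 5]), (0, 1, [2]), (1, 0, [5])], (0, 0), 5)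

def Spec_unique_in_area (possible_values : List (Int × Int × List Int)) (index : Int × Int) (number : Int) (out : Bool) : Prop := out = unique_in_area_alt possible_values index number
instance (possible_values : List (Int × Int × List Int)) (index : Int × Int) (number : Int) (out : Bool) : Decidable (Spec_unique_in_area possible_values index number out) := by unfold Spec_unique_in_area; infer_instance

-- ===== CLAIM (what is proved, stated in full; the proofs are below) =====
def Claim_equal_unique_in_area : Prop := ∀ (possible_values : List (Int × Int × List Int)) (index : Int × Int) (number : Int), Dom_unique_in_area possible_values index number → Pre_unique_in_area possible_values index number → Spec_unique_in_area possible_values index number (unique_in_area possible_values index number)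

-- ===== LEMMAS AND PROOFS =====

-- Nodup keys ⇒ first-match lookup of an entry's key returns that entry's value.
theorem pvLookup_self (d : List (Int × Int × List Int))
    (h : (d.map (fun e => (e.1, e.2.1))).Nodup) :
    ∀ e ∈ d, pvLookup d (e.1, e.2.1) = e.2.2 := by
  induction d with
  | nil => intro e he; cases he
  | cons a rest ih =>
    intro e he
    rcases List.mem_cons.mp he with rfl | he
    · simp [pvLookup]
    · have hne : ¬(a.1 = e.1 ∧ a.2.1 = e.2.1) := by
        intro ⟨h1, h2⟩
        have : (e.1, e.2.1) ∈ rest.map (fun e => (e.1, e.2.1)) :=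
          List.mem_map_of_mem he
        rw [List.map_cons, List.nodup_cons] at h
        exact h.1 (by rw [h1, h2]; exact this)
      simp only [pvLookup]
      rw [if_neg (by simp only [beq_iff_eq, Bool.and_eq_true]; exact fun hc => hne ⟨hc.1, hc.2⟩)]
      exact (List.Nodup.of_cons (by rwa [List.map_cons] at h) : (rest.map _).Nodup) |>
        fun hn => ih hn e he

-- Characterisation of A's loop: each flag ends as (initial flag && no offending key in the list).
theorem loop_char (d l : List (Int × Int × List Int)) (x y number : Int)
    (hl : ∀ e ∈ l, pvLookup d (e.1, e.2.1) = e.2.2) (st : Bool × Bool × Bool) :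
    l.foldl
      (fun (st : Bool × Bool × Bool) key =>
        if key.1 == x && key.2.1 == y then st
        else
          let r := if key.1 == x && (pvLookup d (key.1, key.2.1)).contains number then false else st.1
          let c := if key.2.1 == y && (pvLookup d (key.1, key.2.1)).contains number then false else st.2.1
          let b := if PySem.Int.floordiv key.1 3 == PySem.Int.floordiv x 3 &&
                      PySem.Int.floordiv key.2.1 3 == PySem.Int.floordiv y 3 &&
                      (pvLookup d (key.1, key.2.1)).contains number then false else st.2.2
          (r, c, b)) st
    = (st.1 && !(l.any (fun e => !(e.1 == x && e.2.1 == y) && (e.1 == x && e.2.2.contains number))),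
       st.2.1 && !(l.any (fun e => !(e.1 == x && e.2.1 == y) && (e.2.1 == y && e.2.2.contains number))),
       st.2.2 && !(l.any (fun e => !(e.1 == x && e.2.1 == y) &&
          (PySem.Int.floordiv e.1 3 == PySem.Int.floordiv x 3 &&
           PySem.Int.floordiv e.2.1 3 == PySem.Int.floordiv y 3 && e.2.2.contains number)))) := by
  induction l generalizing st with
  | nil => simp
  | cons a rest ih =>
    have ha := hl a (List.mem_cons_self ..)
    have hrest : ∀ e ∈ rest, pvLookup d (e.1, e.2.1) = e.2.2 :=
      fun e he => hl e (List.mem_cons_of_mem _ he)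
    simp only [List.foldl_cons, List.any_cons, ih hrest]
    by_cases hk : (a.1 == x && a.2.1 == y) = true
    · simp [hk]
    · simp only [if_neg hk, ha, Bool.not_eq_true] at *
      simp [hk, Bool.and_assoc]
      refine ⟨?_, ?_, ?_⟩ <;> (rw [Bool.and_left_comm]; simp only [Bool.beq_eq_decide_eq])

-- B's triple fold splits into three independent histogram folds.
theorem fold3 (number : Int) (l : List (Int × Int × List Int))
    (a b : PySem.Dict Int Int) (c : PySem.Dict (Int × Int) Int) :
    l.foldl
      (fun (acc : PySem.Dict Int Int × PySem.Dict Int Int × PySem.Dict (Int × Int) Int) e =>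
        if e.2.2.contains number then
          (acc.1.insert e.1 (acc.1.getD e.1 0 + 1),
           acc.2.1.insert e.2.1 (acc.2.1.getD e.2.1 0 + 1),
           acc.2.2.insert (PySem.Int.floordiv e.1 3, PySem.Int.floordiv e.2.1 3)
             (acc.2.2.getD (PySem.Int.floordiv e.1 3, PySem.Int.floordiv e.2.1 3) 0 + 1))
        else acc) (a, b, c)
    = (l.foldl (fun d e => if e.2.2.contains number then d.insert e.1 (d.getD e.1 0 + 1) else d) a,
       l.foldl (fun d e => if e.2.2.contains number then d.insert e.2.1 (d.getD e.2.1 0 + 1) else d) b,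
       l.foldl (fun d e => if e.2.2.contains number then
           d.insert (PySem.Int.floordiv e.1 3, PySem.Int.floordiv e.2.1 3)
             (d.getD (PySem.Int.floordiv e.1 3, PySem.Int.floordiv e.2.1 3) 0 + 1) else d) c) := by
  induction l generalizing a b c with
  | nil => rfl
  | cons e rest ih =>
    simp only [List.foldl_cons]
    by_cases he : (e.2.2.contains number) = true
    · rw [if_pos he, if_pos he, if_pos he, if_pos he]; exact ih ..
    · rw [if_neg he, if_neg he, if_neg he, if_neg he]; exact ih ..

-- A conditional histogram fold counts: getD after the fold is initial + count of hits mapped into the group.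
theorem getD_hist {κ : Type} [BEq κ] [LawfulBEq κ] (l : List (Int × Int × List Int))
    (p : (Int × Int × List Int) → Bool) (f : (Int × Int × List Int) → κ) (d : PySem.Dict κ Int) (v : κ) :
    (l.foldl (fun d e => if p e then d.insert (f e) (d.getD (f e) 0 + 1) else d) d).getD v 0
      = d.getD v 0 + ((l.filter p).map f).count v := by
  rw [show (l.foldl (fun d e => if p e then d.insert (f e) (d.getD (f e) 0 + 1) else d) d)
      = ((l.filter p).map f).foldl (fun d k => d.insert k (d.getD k 0 + 1)) d by
    rw [List.foldl_map, List.foldl_filter]]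
  exact PySem.Dict.getD_foldl_insert_add_one ..

-- countP splits along any boolean condition.
theorem countP_split {α : Type} (l : List α) (p q : α → Bool) :
    l.countP p = l.countP (fun e => q e && p e) + l.countP (fun e => !q e && p e) := by
  induction l with
  | nil => simp
  | cons a t ih =>
    simp only [List.countP_cons, ih]
    cases q a <;> cases p a <;> simp <;> omega

-- Under nodup keys, the first-match `.get(index, [])` self-contribution equals the count of
-- index-keyed hit entries.
theorem self_count (pv : List (Int × Int × List Int)) (x y number : Int)
    (h : (pv.map (fun e => (e.1, e.2.1))).Nodup) :
    ((pv.countP (fun e => (e.1 == x && e.2.1 == y) && e.2.2.contains number) : Int))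
      = (if ((((pv.find? (fun e => e.1 == x && e.2.1 == y)).map (fun e => e.2.2)).getD []).contains number)
         then (1 : Int) else 0) := by
  induction pv with
  | nil => simp
  | cons a rest ih =>
    rw [List.map_cons, List.nodup_cons] at h
    by_cases ha : ((a.1 == x && a.2.1 == y) = true)
    · have ha' : a.1 = x ∧ a.2.1 = y := by simpa using ha
      have hrest0 : rest.countP (fun e => (e.1 == x && e.2.1 == y) && e.2.2.contains number) = 0 := by
        rw [List.countP_eq_zero]
        intro e he hc
        have hc' : (e.1 = x ∧ e.2.1 = y) ∧ e.2.2.contains number = true := by simpa using hc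
        exact h.1 (by rw [ha'.1, ha'.2, ← hc'.1.1, ← hc'.1.2]; exact List.mem_map_of_mem he)
      rw [List.countP_cons, hrest0]
      cases hcax : a.2.2.contains number
      · have hm : number ∉ a.2.2 := by simpa using hcax
        simp [List.find?_cons, ha, hcax, hm]
      · have hm : number ∈ a.2.2 := by simpa using hcax
        simp [List.find?_cons, ha, hcax, hm]
    · have hpa : ((a.1 == x && a.2.1 == y) && a.2.2.contains number) = false := by
        simp [Bool.eq_false_iff.mpr ha]
      rw [List.countP_cons, hpa]
      simpa [List.find?_cons, ha] using ih h.2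

-- Core per-area fact: count-equals-self-contribution iff no other cell of the group is a hit.
theorem area_eq {β : Type} [BEq β] [LawfulBEq β] (pv : List (Int × Int × List Int))
    (number x y : Int) (g : (Int × Int × List Int) → β) (q : β)
    (hg : ∀ e : Int × Int × List Int, e.1 = x → e.2.1 = y → g e = q)
    (r : (Int × Int × List Int) → Bool)
    (hr : ∀ e, r e = (!(e.1 == x && e.2.1 == y) && ((g e == q) && e.2.2.contains number))) :
    ((((pv.filter (fun e => e.2.2.contains number)).map g).count q : Int)
        == (pv.countP (fun e => (e.1 == x && e.2.1 == y) && e.2.2.contains number) : Int))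
      = !(pv.any r) := by
  have hcount : ((pv.filter (fun e => e.2.2.contains number)).map g).count q
      = pv.countP (fun e => (g e == q) && e.2.2.contains number) := by
    rw [List.count_eq_countP, List.countP_map, List.countP_filter]
    rfl
  have hsplit := countP_split pv
    (fun e => (g e == q) && e.2.2.contains number) (fun e => e.1 == x && e.2.1 == y)
  have hfirst : pv.countP (fun e => (e.1 == x && e.2.1 == y) && ((g e == q) && e.2.2.contains number))
      = pv.countP (fun e => (e.1 == x && e.2.1 == y) && e.2.2.contains number) := by
    apply List.countP_congr
    intro a _
    by_cases hk : ((a.1 == x && a.2.1 == y) = true)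
    · obtain ⟨h1, h2⟩ := Bool.and_eq_true .. ▸ hk
      have : g a = q := hg a (by simpa using h1) (by simpa using h2)
      simp [hk, this]
    · simp [Bool.eq_false_iff.mpr hk]
  rw [hcount, hsplit, hfirst]
  cases hany : pv.any r with
  | false =>
    have h0 : pv.countP (fun e => !(e.1 == x && e.2.1 == y) && ((g e == q) && e.2.2.contains number)) = 0 := by
      rw [List.countP_eq_zero]
      intro e he
      have := (List.any_eq_false.mp hany) e he
      rw [hr e] at this
      exact this
    rw [h0]
    simp
  | true =>
    obtain ⟨a, ha, hpa⟩ := List.any_eq_true.mp hany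
    rw [hr a] at hpa
    have hpos : pv.countP (fun e => !(e.1 == x && e.2.1 == y) && ((g e == q) && e.2.2.contains number)) ≠ 0 :=
      fun h0 => (List.countP_eq_zero.mp h0 a ha) hpa
    simp only [Bool.not_true]
    rw [beq_eq_false_iff_ne]
    push_cast
    omega

-- ===== VERDICT (by name: the statement is the Claim_ definition above) =====
theorem unique_in_area_spec : Claim_equal_unique_in_area := by
  intro pv index number _hdom hpre
  unfold Spec_unique_in_area
  obtain ⟨ix, iy⟩ := index
  unfold unique_in_area unique_in_area_alt
  dsimp only
  rw [loop_char pv pv ix iy number (pvLookup_self pv hpre), fold3]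
  simp only [Bool.true_and, getD_hist, PySem.Dict.getD_empty, zero_add,
    ← self_count pv ix iy number hpre]
  have h1 := area_eq pv number ix iy (fun e => e.1) ix (fun e h _ => h)
    (fun e => !(e.1 == ix && e.2.1 == iy) && (e.1 == ix && e.2.2.contains number))
    (fun e => rfl)
  have h2 := area_eq pv number ix iy (fun e => e.2.1) iy (fun e _ h => h)
    (fun e => !(e.1 == ix && e.2.1 == iy) && (e.2.1 == iy && e.2.2.contains number))
    (fun e => rfl)
  have h3 := area_eq pv number ix iy
    (fun e => (PySem.Int.floordiv e.1 3, PySem.Int.floordiv e.2.1 3))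
    (PySem.Int.floordiv ix 3, PySem.Int.floordiv iy 3)
    (fun e hx hy => by dsimp only; rw [hx, hy])
    (fun e => !(e.1 == ix && e.2.1 == iy) &&
      (PySem.Int.floordiv e.1 3 == PySem.Int.floordiv ix 3 &&
       PySem.Int.floordiv e.2.1 3 == PySem.Int.floordiv iy 3 && e.2.2.contains number))
    (fun e => by
      cases h4 : (PySem.Int.floordiv e.1 3 == PySem.Int.floordiv ix 3) <;>
      cases h5 : (PySem.Int.floordiv e.2.1 3 == PySem.Int.floordiv iy 3) <;>
        simp [show ∀ a b c d : Int, ((a, b) == (c, d)) = ((a == c) && (b == d))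
          from fun _ _ _ _ => rfl])
  rw [h1, h2, h3]
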